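-- pv_equiv track=rewrite | github.com/FieryIceStickie/AdventOfCode | src/Y2024/Day14/main.py | full_solver
-- ===== SOURCE A (Python) =====
-- from operator import itemgetter
-- from collections import Counter
--
-- def full_solver(grid: list[tuple[int, int, int, int]], w: int, h: int):
--     grid = [[px, vx, py, vy] for px, py, vx, vy in grid]
--     xt = yt = 0
--     p1 = None
--     [(_, x_max)] = Counter(map(itemgetter(0), grid)).most_common(1)
--     [(_, y_max)] = Counter(map(itemgetter(2), grid)).most_common(1)
--     for t in range(1, max(w, h, 101)):
--         for bot in grid:
--             px, vx, py, vy = bot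
--             bot[0] = (px + vx) % w
--             bot[2] = (py + vy) % h
--         if t == 100:
--             c = [[0, 0, 0], [0, 0, 0], [0, 0, 0]]
--             wh, hh = w // 2, h // 2
--             for px, vx, py, vy in grid:
--                 c[(px < wh) - (px > wh)][(py < hh) - (py > hh)] += 1
--             p1 = c[1][1] * c[1][2] * c[2][1] * c[2][2]
--         [(_, mx)] = Counter(map(itemgetter(0), grid)).most_common(1)
--         if mx > x_max:
--             x_max = mx
--             xt = t
--         [(_, my)] = Counter(map(itemgetter(2), grid)).most_common(1)
--         if my > y_max:
--             y_max = my
--             yt = t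
--     xt %= w
--     yt %= h
--     p2 = xt + (yt - xt) * pow(w, -1, h) * w % (w * h)
--     return p1, p2
-- ===== SOURCE B (Python) =====
-- from collections import Counter
--
--
-- def full_solver(grid: list[tuple[int, int, int, int]], w: int, h: int):
--     T = max(w, h, 101)
--     xs = [(px, vx) for px, py, vx, vy in grid]
--     ys = [(py, vy) for px, py, vx, vy in grid]
--
--     def top(vals):
--         return max(Counter(vals).values())
--
--     def peak(pairs, m):
--         best, bt = top([p for p, v in pairs]), 0
--         for t in range(1, T):
--             c = top([(p + t * v) % m for p, v in pairs])
--             if c > best: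
--                 best, bt = c, t
--         return bt
--
--     wh, hh = w // 2, h // 2
--     fin = [((px + 100 * vx) % w, (py + 100 * vy) % h) for px, py, vx, vy in grid]
--     p1 = (sum(1 for x, y in fin if x < wh and y < hh)
--           * sum(1 for x, y in fin if x < wh and y > hh)
--           * sum(1 for x, y in fin if x > wh and y < hh)
--           * sum(1 for x, y in fin if x > wh and y > hh))
--     xt = peak(xs, w) % w
--     yt = peak(ys, h) % h
--     p2 = xt + (yt - xt) * pow(w, -1, h) * w % (w * h)
--     return p1, p2
-- ===== Notes on version B (the rewrite author's own statement) =====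
-- stated objective: alternative
-- what changed: A runs one coupled loop that mutates every robot step by step, tallying part 1 at t=100 and both column/row record counts inside it; B decomposes the problem into three independent closed-form passes: part 1 by advancing each robot 100 steps directly ((p+100*v)%m) and multiplying four quadrant indicator sums, and part 2 by two separate record scans over closed-form positions (p+t*v)%m, keeping the identical strict-record seeding and the same CRT expression.
import Mathlib
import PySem

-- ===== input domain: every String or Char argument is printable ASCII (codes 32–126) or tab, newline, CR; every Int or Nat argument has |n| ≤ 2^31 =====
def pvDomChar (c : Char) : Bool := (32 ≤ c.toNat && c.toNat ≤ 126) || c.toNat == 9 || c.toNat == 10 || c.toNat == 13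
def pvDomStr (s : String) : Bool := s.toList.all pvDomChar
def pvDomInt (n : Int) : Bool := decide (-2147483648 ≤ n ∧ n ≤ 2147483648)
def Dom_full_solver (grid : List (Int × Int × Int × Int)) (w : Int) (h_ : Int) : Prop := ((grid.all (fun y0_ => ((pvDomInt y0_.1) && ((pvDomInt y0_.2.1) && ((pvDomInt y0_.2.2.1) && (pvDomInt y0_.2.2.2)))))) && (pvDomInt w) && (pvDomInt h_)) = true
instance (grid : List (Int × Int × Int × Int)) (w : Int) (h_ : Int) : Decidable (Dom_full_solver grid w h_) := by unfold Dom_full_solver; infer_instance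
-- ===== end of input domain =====

-- B recomputes part 1 in closed form (100-step advance) and part 2 by two independent
-- record scans over closed-form positions, instead of A's single coupled mutation loop;
-- objective: alternative decomposition (same asymptotic cost).

-- Hand port of Python's pow(b, -1, m) (modular inverse; none = ValueError/ZeroDivisionError),
-- exact via extended gcd and Python's sign-of-divisor mod; shared verbatim by both ports
-- (both Pythons contain the identical call pow(w, -1, h)).
def pvInvMod (a m : Int) : Option Int :=
  if m = 0 then none
  else
    let n : Nat := m.natAbs
    let r : Nat := (a.emod (n : Int)).toNat
    if Nat.gcd r n = 1 then some (PySem.Int.mod (Nat.gcdA r n) m) else none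

-- ===== PORT A =====
-- A's bots are fixed-length-4 mutable lists [px, vx, py, vy]; ported as 4-tuples.
-- Counter(...).most_common(1)'s count: head of the count-descending stable sort of the items.
-- The [] branch is where Python's 1-element unpacking raises (empty grid); excluded by Pre_.
def pvMostCount (l : List Int) : Int :=
  match PySem.List.sorted (PySem.Dict.counter l).items (fun kv => kv.2) true with
  | (_, c) :: _ => c
  | [] => 0

-- c[i][j] += 1 on the 3×3 nested list, with Python (possibly negative) indexing.
def pvBump (c : List (List Int)) (i j : Int) : List (List Int) :=
  let row := PySem.List.pyGetD c i []
  PySem.List.pySetD c i (PySem.List.pySetD row j (PySem.List.pyGetD row j 0 + 1))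

def pvQuadTally (wh hh : Int) (g : List (Int × Int × Int × Int)) : List (List Int) :=
  g.foldl (fun c b =>
      pvBump c ((if b.1 < wh then (1 : Int) else 0) - (if wh < b.1 then 1 else 0))
               ((if b.2.2.1 < hh then (1 : Int) else 0) - (if hh < b.2.2.1 then 1 else 0)))
    [[0, 0, 0], [0, 0, 0], [0, 0, 0]]

structure PVSt where
  g : List (Int × Int × Int × Int)
  xt : Int
  yt : Int
  xm : Int
  ym : Int
  p1 : Option Int
deriving Repr, DecidableEq

def pvAStep (w h_ : Int) (st : PVSt) (t : Int) : PVSt :=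
  let g := st.g.map (fun b =>
    (PySem.Int.mod (b.1 + b.2.1) w, b.2.1, PySem.Int.mod (b.2.2.1 + b.2.2.2) h_, b.2.2.2))
  let p1 := if t = 100 then
      let wh := PySem.Int.floordiv w 2
      let hh := PySem.Int.floordiv h_ 2
      let c := pvQuadTally wh hh g
      some (PySem.List.pyGetD (PySem.List.pyGetD c 1 []) 1 0 *
            PySem.List.pyGetD (PySem.List.pyGetD c 1 []) 2 0 *
            PySem.List.pyGetD (PySem.List.pyGetD c 2 []) 1 0 *
            PySem.List.pyGetD (PySem.List.pyGetD c 2 []) 2 0)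
    else st.p1
  let mx := pvMostCount (g.map (·.1))
  let xmt := if mx > st.xm then (mx, t) else (st.xm, st.xt)
  let my := pvMostCount (g.map (·.2.2.1))
  let ymt := if my > st.ym then (my, t) else (st.ym, st.yt)
  ⟨g, xmt.2, ymt.2, xmt.1, ymt.1, p1⟩

def full_solver (grid : List (Int × Int × Int × Int)) (w : Int) (h_ : Int) : Int × Int :=
  let grid0 := grid.map (fun b => (b.1, b.2.2.1, b.2.1, b.2.2.2))
  let xmax0 := pvMostCount (grid0.map (·.1))
  let ymax0 := pvMostCount (grid0.map (·.2.2.1))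
  let fin := (PySem.List.pyRange 1 (max (max w h_) 101)).foldl (pvAStep w h_)
      ⟨grid0, 0, 0, xmax0, ymax0, none⟩
  let xt := PySem.Int.mod fin.xt w
  let yt := PySem.Int.mod fin.yt h_
  let p2 := xt + PySem.Int.mod ((yt - xt) * (pvInvMod w h_).getD 0 * w) (w * h_)
  (fin.p1.getD 0, p2)

-- ===== PORT B =====
-- max(Counter(vals).values()); 0-branch = Python's max() on empty (empty grid), excluded by Pre_.
def pvTop (l : List Int) : Int :=
  match PySem.List.max? (PySem.Dict.counter l).values (fun v => v) with
  | some m => m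
  | none => 0

def pvBStep (pairs : List (Int × Int)) (m : Int) (st : Int × Int) (t : Int) : Int × Int :=
  let c := pvTop (pairs.map (fun pv => PySem.Int.mod (pv.1 + t * pv.2) m))
  if c > st.1 then (c, t) else st

def pvPeak (pairs : List (Int × Int)) (m T : Int) : Int :=
  ((PySem.List.pyRange 1 T).foldl (pvBStep pairs m) (pvTop (pairs.map (·.1)), 0)).2

def pvP1 (grid : List (Int × Int × Int × Int)) (w : Int) (h_ : Int) : Int :=
  let wh := PySem.Int.floordiv w 2
  let hh := PySem.Int.floordiv h_ 2
  let fin := grid.map (fun b =>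
    (PySem.Int.mod (b.1 + 100 * b.2.2.1) w, PySem.Int.mod (b.2.1 + 100 * b.2.2.2) h_))
  ((fin.map (fun q => if q.1 < wh ∧ q.2 < hh then (1 : Int) else 0)).sum)
  * ((fin.map (fun q => if q.1 < wh ∧ hh < q.2 then (1 : Int) else 0)).sum)
  * ((fin.map (fun q => if wh < q.1 ∧ q.2 < hh then (1 : Int) else 0)).sum)
  * ((fin.map (fun q => if wh < q.1 ∧ hh < q.2 then (1 : Int) else 0)).sum)

def full_solver_alt (grid : List (Int × Int × Int × Int)) (w : Int) (h_ : Int) : Int × Int :=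
  let T := max (max w h_) 101
  let xs := grid.map (fun b => (b.1, b.2.2.1))
  let ys := grid.map (fun b => (b.2.1, b.2.2.2))
  let p1 := pvP1 grid w h_
  let xt := PySem.Int.mod (pvPeak xs w T) w
  let yt := PySem.Int.mod (pvPeak ys h_ T) h_
  let p2 := xt + PySem.Int.mod ((yt - xt) * (pvInvMod w h_).getD 0 * w) (w * h_)
  (p1, p2)

-- ===== PRECONDITION & SPEC =====
-- Pre_ excludes exactly the inputs where the Python A raises: empty grid (unpacking
-- most_common(1) of an empty Counter → ValueError), w = 0 or h = 0 (ZeroDivisionError on %),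
-- and gcd(w, h) ≠ 1 (pow(w, -1, h) → ValueError).
def Pre_full_solver (grid : List (Int × Int × Int × Int)) (w : Int) (h_ : Int) : Prop :=
  grid ≠ [] ∧ w ≠ 0 ∧ h_ ≠ 0 ∧ Int.gcd w h_ = 1
instance (grid : List (Int × Int × Int × Int)) (w : Int) (h_ : Int) : Decidable (Pre_full_solver grid w h_) := by unfold Pre_full_solver; infer_instance

def pvWitness_full_solver : (List (Int × Int × Int × Int)) × Int × Int := ([(0, 0, 1, 1), (2, 3, 1, 0)], 3, 2)

def Spec_full_solver (grid : List (Int × Int × Int × Int)) (w : Int) (h_ : Int) (out : Int × Int) : Prop := out = full_solver_alt grid w h_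
instance (grid : List (Int × Int × Int × Int)) (w : Int) (h_ : Int) (out : Int × Int) : Decidable (Spec_full_solver grid w h_ out) := by unfold Spec_full_solver; infer_instance

-- ===== CLAIM (what is proved, stated in full; the proofs are below) =====
def Claim_equal_full_solver : Prop := ∀ (grid : List (Int × Int × Int × Int)) (w : Int) (h_ : Int), Dom_full_solver grid w h_ → Pre_full_solver grid w h_ → Spec_full_solver grid w h_ (full_solver grid w h_)

-- ===== LEMMAS AND PROOFS =====

theorem pvMostCount_eq_pvTop (l : List Int) (hl : l ≠ []) : pvMostCount l = pvTop l := by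
  have hitems : (PySem.Dict.counter l).items ≠ [] := by
    rw [PySem.Dict.items_counter]
    simp only [ne_eq, List.map_eq_nil_iff]
    intro h
    obtain ⟨x, hx⟩ := List.exists_mem_of_ne_nil l hl
    have := (PySem.Set.mem_ofList (xs := l) (y := x)).2 hx
    simp [h] at this
  have hvals : (PySem.Dict.counter l).values = (PySem.Dict.counter l).items.map (·.2) := rfl
  unfold pvMostCount pvTop
  cases hs : PySem.List.sorted (PySem.Dict.counter l).items (fun kv => kv.2) true with
  | nil => exact absurd ((PySem.List.sorted_eq_nil_iff _ _ _).1 hs) hitems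
  | cons hd tl =>
    obtain ⟨k, c⟩ := hd
    cases hm : PySem.List.max? (PySem.Dict.counter l).values (fun v => v) with
    | none =>
      rw [PySem.List.max?_eq_none_iff, hvals, List.map_eq_nil_iff] at hm
      exact absurd hm hitems
    | some m =>
      have hcmem : ((k, c) : Int × Int) ∈ (PySem.Dict.counter l).items := by
        have : ((k, c) : Int × Int) ∈ PySem.List.sorted (PySem.Dict.counter l).items (fun kv => kv.2) true := by
          rw [hs]; exact List.mem_cons_self
        exact (PySem.List.mem_sorted _ _ _ _).1 this
      have hcle : ∀ y ∈ (PySem.Dict.counter l).items, y.2 ≤ c :=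
        PySem.List.key_head_sorted_rev_ge _ _ hs
      have hmmem : m ∈ (PySem.Dict.counter l).values := PySem.List.max?_mem hm
      have hmle : ∀ v ∈ (PySem.Dict.counter l).values, v ≤ m := PySem.List.max?_isMax hm
      have h1 : c ≤ m := hmle c (by rw [hvals]; exact List.mem_map.2 ⟨(k, c), hcmem, rfl⟩)
      have h2 : m ≤ c := by
        rw [hvals] at hmmem
        obtain ⟨y, hy, hym⟩ := List.mem_map.1 hmmem
        exact hym ▸ hcle y hy
      exact le_antisymm h1 h2

-- Python-mod congruence: ((a % m) + b) % m = (a + b) % m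
theorem pvMod_add (a b m : Int) : PySem.Int.mod (PySem.Int.mod a m + b) m = PySem.Int.mod (a + b) m := by
  simp only [PySem.Int.mod]
  conv_rhs => rw [Int.add_fmod]
  rw [Int.add_fmod (Int.fmod a m)]
  rw [Int.fmod_fmod_of_dvd _ dvd_rfl]

-- bots of A's grid after t steps, in closed form
def pvGAt (grid : List (Int × Int × Int × Int)) (w h_ t : Int) : List (Int × Int × Int × Int) :=
  grid.map (fun r =>
    (PySem.Int.mod (r.1 + t * r.2.2.1) w, r.2.2.1, PySem.Int.mod (r.2.1 + t * r.2.2.2) h_, r.2.2.2))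

-- B's record scan, stopped after the range 1..b-1
def pvSFold (grid : List (Int × Int × Int × Int)) (sel : (Int × Int × Int × Int) → Int × Int) (m b : Int) : Int × Int :=
  (PySem.List.pyRange 1 b).foldl (pvBStep (grid.map sel) m)
    (pvTop ((grid.map sel).map (·.1)), 0)

theorem pvBump_0_0 (a b c d e f g h i : Int) : pvBump [[a,b,c],[d,e,f],[g,h,i]] 0 0 = [[a+1,b,c],[d,e,f],[g,h,i]] := rfl
theorem pvBump_0_1 (a b c d e f g h i : Int) : pvBump [[a,b,c],[d,e,f],[g,h,i]] 0 1 = [[a,b+1,c],[d,e,f],[g,h,i]] := rfl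
theorem pvBump_0_m1 (a b c d e f g h i : Int) : pvBump [[a,b,c],[d,e,f],[g,h,i]] 0 (-1) = [[a,b,c+1],[d,e,f],[g,h,i]] := rfl
theorem pvBump_1_0 (a b c d e f g h i : Int) : pvBump [[a,b,c],[d,e,f],[g,h,i]] 1 0 = [[a,b,c],[d+1,e,f],[g,h,i]] := rfl
theorem pvBump_1_m1 (a b c d e f g h i : Int) : pvBump [[a,b,c],[d,e,f],[g,h,i]] 1 (-1) = [[a,b,c],[d,e,f+1],[g,h,i]] := rfl
theorem pvBump_m1_0 (a b c d e f g h i : Int) : pvBump [[a,b,c],[d,e,f],[g,h,i]] (-1) 0 = [[a,b,c],[d,e,f],[g+1,h,i]] := rfl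
theorem pvBump_m1_1 (a b c d e f g h i : Int) : pvBump [[a,b,c],[d,e,f],[g,h,i]] (-1) 1 = [[a,b,c],[d,e,f],[g,h+1,i]] := rfl
theorem pvBump_m1_m1 (a b c d e f g h i : Int) : pvBump [[a,b,c],[d,e,f],[g,h,i]] (-1) (-1) = [[a,b,c],[d,e,f],[g,h,i+1]] := rfl
theorem pvBump_1_1 (a b c d e f g h i : Int) : pvBump [[a,b,c],[d,e,f],[g,h,i]] 1 1 = [[a,b,c],[d,e+1,f],[g,h,i]] := rfl

theorem pvTallyFold (wh hh : Int) (l : List (Int × Int × Int × Int)) :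
    ∀ a b c d e f g0 h0 i : Int,
    l.foldl (fun cc r =>
        pvBump cc ((if r.1 < wh then (1 : Int) else 0) - (if wh < r.1 then 1 else 0))
                  ((if r.2.2.1 < hh then (1 : Int) else 0) - (if hh < r.2.2.1 then 1 else 0)))
      [[a,b,c],[d,e,f],[g0,h0,i]]
    = [[a + (l.map (fun r => if r.1 = wh ∧ r.2.2.1 = hh then (1:Int) else 0)).sum,
        b + (l.map (fun r => if r.1 = wh ∧ r.2.2.1 < hh then (1:Int) else 0)).sum,
        c + (l.map (fun r => if r.1 = wh ∧ hh < r.2.2.1 then (1:Int) else 0)).sum],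
       [d + (l.map (fun r => if r.1 < wh ∧ r.2.2.1 = hh then (1:Int) else 0)).sum,
        e + (l.map (fun r => if r.1 < wh ∧ r.2.2.1 < hh then (1:Int) else 0)).sum,
        f + (l.map (fun r => if r.1 < wh ∧ hh < r.2.2.1 then (1:Int) else 0)).sum],
       [g0 + (l.map (fun r => if wh < r.1 ∧ r.2.2.1 = hh then (1:Int) else 0)).sum,
        h0 + (l.map (fun r => if wh < r.1 ∧ r.2.2.1 < hh then (1:Int) else 0)).sum,
        i + (l.map (fun r => if wh < r.1 ∧ hh < r.2.2.1 then (1:Int) else 0)).sum]] := by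
  induction l with
  | nil => intro a b c d e f g0 h0 i; simp
  | cons r l IH =>
    intro a b c d e f g0 h0 i
    simp only [List.foldl_cons, List.map_cons, List.sum_cons]
    rcases lt_trichotomy r.1 wh with h1 | h1 | h1 <;>
      rcases lt_trichotomy r.2.2.1 hh with h2 | h2 | h2
    · rw [show ((if r.1 < wh then (1:Int) else 0) - (if wh < r.1 then 1 else 0)) = 1 by
        rw [if_pos h1, if_neg (by omega)]; norm_num]
      rw [show ((if r.2.2.1 < hh then (1:Int) else 0) - (if hh < r.2.2.1 then 1 else 0)) = 1 by
        rw [if_pos h2, if_neg (by omega)]; norm_num]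
      rw [pvBump_1_1, IH]
      rw [if_neg (by omega : ¬(r.1 = wh ∧ r.2.2.1 = hh)), if_neg (by omega : ¬(r.1 = wh ∧ r.2.2.1 < hh)), if_neg (by omega : ¬(r.1 = wh ∧ hh < r.2.2.1)), if_neg (by omega : ¬(r.1 < wh ∧ r.2.2.1 = hh)), if_pos (⟨h1, h2⟩ : r.1 < wh ∧ r.2.2.1 < hh), if_neg (by omega : ¬(r.1 < wh ∧ hh < r.2.2.1)), if_neg (by omega : ¬(wh < r.1 ∧ r.2.2.1 = hh)), if_neg (by omega : ¬(wh < r.1 ∧ r.2.2.1 < hh)), if_neg (by omega : ¬(wh < r.1 ∧ hh < r.2.2.1))]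
      norm_num [add_assoc, add_comm, add_left_comm]
    · rw [show ((if r.1 < wh then (1:Int) else 0) - (if wh < r.1 then 1 else 0)) = 1 by
        rw [if_pos h1, if_neg (by omega)]; norm_num]
      rw [show ((if r.2.2.1 < hh then (1:Int) else 0) - (if hh < r.2.2.1 then 1 else 0)) = 0 by
        rw [if_neg (by omega), if_neg (by omega)]; norm_num]
      rw [pvBump_1_0, IH]
      rw [if_neg (by omega : ¬(r.1 = wh ∧ r.2.2.1 = hh)), if_neg (by omega : ¬(r.1 = wh ∧ r.2.2.1 < hh)), if_neg (by omega : ¬(r.1 = wh ∧ hh < r.2.2.1)), if_pos (⟨h1, h2⟩ : r.1 < wh ∧ r.2.2.1 = hh), if_neg (by omega : ¬(r.1 < wh ∧ r.2.2.1 < hh)), if_neg (by omega : ¬(r.1 < wh ∧ hh < r.2.2.1)), if_neg (by omega : ¬(wh < r.1 ∧ r.2.2.1 = hh)), if_neg (by omega : ¬(wh < r.1 ∧ r.2.2.1 < hh)), if_neg (by omega : ¬(wh < r.1 ∧ hh < r.2.2.1))]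
      norm_num [add_assoc, add_comm, add_left_comm]
    · rw [show ((if r.1 < wh then (1:Int) else 0) - (if wh < r.1 then 1 else 0)) = 1 by
        rw [if_pos h1, if_neg (by omega)]; norm_num]
      rw [show ((if r.2.2.1 < hh then (1:Int) else 0) - (if hh < r.2.2.1 then 1 else 0)) = -1 by
        rw [if_neg (by omega), if_pos h2]; norm_num]
      rw [pvBump_1_m1, IH]
      rw [if_neg (by omega : ¬(r.1 = wh ∧ r.2.2.1 = hh)), if_neg (by omega : ¬(r.1 = wh ∧ r.2.2.1 < hh)), if_neg (by omega : ¬(r.1 = wh ∧ hh < r.2.2.1)), if_neg (by omega : ¬(r.1 < wh ∧ r.2.2.1 = hh)), if_neg (by omega : ¬(r.1 < wh ∧ r.2.2.1 < hh)), if_pos (⟨h1, h2⟩ : r.1 < wh ∧ hh < r.2.2.1), if_neg (by omega : ¬(wh < r.1 ∧ r.2.2.1 = hh)), if_neg (by omega : ¬(wh < r.1 ∧ r.2.2.1 < hh)), if_neg (by omega : ¬(wh < r.1 ∧ hh < r.2.2.1))]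
      norm_num [add_assoc, add_comm, add_left_comm]
    · rw [show ((if r.1 < wh then (1:Int) else 0) - (if wh < r.1 then 1 else 0)) = 0 by
        rw [if_neg (by omega), if_neg (by omega)]; norm_num]
      rw [show ((if r.2.2.1 < hh then (1:Int) else 0) - (if hh < r.2.2.1 then 1 else 0)) = 1 by
        rw [if_pos h2, if_neg (by omega)]; norm_num]
      rw [pvBump_0_1, IH]
      rw [if_neg (by omega : ¬(r.1 = wh ∧ r.2.2.1 = hh)), if_pos (⟨h1, h2⟩ : r.1 = wh ∧ r.2.2.1 < hh), if_neg (by omega : ¬(r.1 = wh ∧ hh < r.2.2.1)), if_neg (by omega : ¬(r.1 < wh ∧ r.2.2.1 = hh)), if_neg (by omega : ¬(r.1 < wh ∧ r.2.2.1 < hh)), if_neg (by omega : ¬(r.1 < wh ∧ hh < r.2.2.1)), if_neg (by omega : ¬(wh < r.1 ∧ r.2.2.1 = hh)), if_neg (by omega : ¬(wh < r.1 ∧ r.2.2.1 < hh)), if_neg (by omega : ¬(wh < r.1 ∧ hh < r.2.2.1))]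
      norm_num [add_assoc, add_comm, add_left_comm]
    · rw [show ((if r.1 < wh then (1:Int) else 0) - (if wh < r.1 then 1 else 0)) = 0 by
        rw [if_neg (by omega), if_neg (by omega)]; norm_num]
      rw [show ((if r.2.2.1 < hh then (1:Int) else 0) - (if hh < r.2.2.1 then 1 else 0)) = 0 by
        rw [if_neg (by omega), if_neg (by omega)]; norm_num]
      rw [pvBump_0_0, IH]
      rw [if_pos (⟨h1, h2⟩ : r.1 = wh ∧ r.2.2.1 = hh), if_neg (by omega : ¬(r.1 = wh ∧ r.2.2.1 < hh)), if_neg (by omega : ¬(r.1 = wh ∧ hh < r.2.2.1)), if_neg (by omega : ¬(r.1 < wh ∧ r.2.2.1 = hh)), if_neg (by omega : ¬(r.1 < wh ∧ r.2.2.1 < hh)), if_neg (by omega : ¬(r.1 < wh ∧ hh < r.2.2.1)), if_neg (by omega : ¬(wh < r.1 ∧ r.2.2.1 = hh)), if_neg (by omega : ¬(wh < r.1 ∧ r.2.2.1 < hh)), if_neg (by omega : ¬(wh < r.1 ∧ hh < r.2.2.1))]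
      norm_num [add_assoc, add_comm, add_left_comm]
    · rw [show ((if r.1 < wh then (1:Int) else 0) - (if wh < r.1 then 1 else 0)) = 0 by
        rw [if_neg (by omega), if_neg (by omega)]; norm_num]
      rw [show ((if r.2.2.1 < hh then (1:Int) else 0) - (if hh < r.2.2.1 then 1 else 0)) = -1 by
        rw [if_neg (by omega), if_pos h2]; norm_num]
      rw [pvBump_0_m1, IH]
      rw [if_neg (by omega : ¬(r.1 = wh ∧ r.2.2.1 = hh)), if_neg (by omega : ¬(r.1 = wh ∧ r.2.2.1 < hh)), if_pos (⟨h1, h2⟩ : r.1 = wh ∧ hh < r.2.2.1), if_neg (by omega : ¬(r.1 < wh ∧ r.2.2.1 = hh)), if_neg (by omega : ¬(r.1 < wh ∧ r.2.2.1 < hh)), if_neg (by omega : ¬(r.1 < wh ∧ hh < r.2.2.1)), if_neg (by omega : ¬(wh < r.1 ∧ r.2.2.1 = hh)), if_neg (by omega : ¬(wh < r.1 ∧ r.2.2.1 < hh)), if_neg (by omega : ¬(wh < r.1 ∧ hh < r.2.2.1))]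
      norm_num [add_assoc, add_comm, add_left_comm]
    · rw [show ((if r.1 < wh then (1:Int) else 0) - (if wh < r.1 then 1 else 0)) = -1 by
        rw [if_neg (by omega), if_pos h1]; norm_num]
      rw [show ((if r.2.2.1 < hh then (1:Int) else 0) - (if hh < r.2.2.1 then 1 else 0)) = 1 by
        rw [if_pos h2, if_neg (by omega)]; norm_num]
      rw [pvBump_m1_1, IH]
      rw [if_neg (by omega : ¬(r.1 = wh ∧ r.2.2.1 = hh)), if_neg (by omega : ¬(r.1 = wh ∧ r.2.2.1 < hh)), if_neg (by omega : ¬(r.1 = wh ∧ hh < r.2.2.1)), if_neg (by omega : ¬(r.1 < wh ∧ r.2.2.1 = hh)), if_neg (by omega : ¬(r.1 < wh ∧ r.2.2.1 < hh)), if_neg (by omega : ¬(r.1 < wh ∧ hh < r.2.2.1)), if_neg (by omega : ¬(wh < r.1 ∧ r.2.2.1 = hh)), if_pos (⟨h1, h2⟩ : wh < r.1 ∧ r.2.2.1 < hh), if_neg (by omega : ¬(wh < r.1 ∧ hh < r.2.2.1))]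
      norm_num [add_assoc, add_comm, add_left_comm]
    · rw [show ((if r.1 < wh then (1:Int) else 0) - (if wh < r.1 then 1 else 0)) = -1 by
        rw [if_neg (by omega), if_pos h1]; norm_num]
      rw [show ((if r.2.2.1 < hh then (1:Int) else 0) - (if hh < r.2.2.1 then 1 else 0)) = 0 by
        rw [if_neg (by omega), if_neg (by omega)]; norm_num]
      rw [pvBump_m1_0, IH]
      rw [if_neg (by omega : ¬(r.1 = wh ∧ r.2.2.1 = hh)), if_neg (by omega : ¬(r.1 = wh ∧ r.2.2.1 < hh)), if_neg (by omega : ¬(r.1 = wh ∧ hh < r.2.2.1)), if_neg (by omega : ¬(r.1 < wh ∧ r.2.2.1 = hh)), if_neg (by omega : ¬(r.1 < wh ∧ r.2.2.1 < hh)), if_neg (by omega : ¬(r.1 < wh ∧ hh < r.2.2.1)), if_pos (⟨h1, h2⟩ : wh < r.1 ∧ r.2.2.1 = hh), if_neg (by omega : ¬(wh < r.1 ∧ r.2.2.1 < hh)), if_neg (by omega : ¬(wh < r.1 ∧ hh < r.2.2.1))]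
      norm_num [add_assoc, add_comm, add_left_comm]
    · rw [show ((if r.1 < wh then (1:Int) else 0) - (if wh < r.1 then 1 else 0)) = -1 by
        rw [if_neg (by omega), if_pos h1]; norm_num]
      rw [show ((if r.2.2.1 < hh then (1:Int) else 0) - (if hh < r.2.2.1 then 1 else 0)) = -1 by
        rw [if_neg (by omega), if_pos h2]; norm_num]
      rw [pvBump_m1_m1, IH]
      rw [if_neg (by omega : ¬(r.1 = wh ∧ r.2.2.1 = hh)), if_neg (by omega : ¬(r.1 = wh ∧ r.2.2.1 < hh)), if_neg (by omega : ¬(r.1 = wh ∧ hh < r.2.2.1)), if_neg (by omega : ¬(r.1 < wh ∧ r.2.2.1 = hh)), if_neg (by omega : ¬(r.1 < wh ∧ r.2.2.1 < hh)), if_neg (by omega : ¬(r.1 < wh ∧ hh < r.2.2.1)), if_neg (by omega : ¬(wh < r.1 ∧ r.2.2.1 = hh)), if_neg (by omega : ¬(wh < r.1 ∧ r.2.2.1 < hh)), if_pos (⟨h1, h2⟩ : wh < r.1 ∧ hh < r.2.2.1)]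
      norm_num [add_assoc, add_comm, add_left_comm]

theorem pvQuadTally_eq (wh hh : Int) (g : List (Int × Int × Int × Int)) :
    pvQuadTally wh hh g
    = [[(g.map (fun r => if r.1 = wh ∧ r.2.2.1 = hh then (1:Int) else 0)).sum,
        (g.map (fun r => if r.1 = wh ∧ r.2.2.1 < hh then (1:Int) else 0)).sum,
        (g.map (fun r => if r.1 = wh ∧ hh < r.2.2.1 then (1:Int) else 0)).sum],
       [(g.map (fun r => if r.1 < wh ∧ r.2.2.1 = hh then (1:Int) else 0)).sum,
        (g.map (fun r => if r.1 < wh ∧ r.2.2.1 < hh then (1:Int) else 0)).sum,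
        (g.map (fun r => if r.1 < wh ∧ hh < r.2.2.1 then (1:Int) else 0)).sum],
       [(g.map (fun r => if wh < r.1 ∧ r.2.2.1 = hh then (1:Int) else 0)).sum,
        (g.map (fun r => if wh < r.1 ∧ r.2.2.1 < hh then (1:Int) else 0)).sum,
        (g.map (fun r => if wh < r.1 ∧ hh < r.2.2.1 then (1:Int) else 0)).sum]] := by
  have h := pvTallyFold wh hh g 0 0 0 0 0 0 0 0 0
  simpa [pvQuadTally] using h

-- A's quadrant tally read at the four used cells equals B's four indicator sums
theorem pvTally_read (wh hh : Int) (g : List (Int × Int × Int × Int)) :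
    (PySem.List.pyGetD (PySem.List.pyGetD (pvQuadTally wh hh g) 1 []) 1 0 =
      (g.map (fun r => if r.1 < wh ∧ r.2.2.1 < hh then (1 : Int) else 0)).sum) ∧
    (PySem.List.pyGetD (PySem.List.pyGetD (pvQuadTally wh hh g) 1 []) 2 0 =
      (g.map (fun r => if r.1 < wh ∧ hh < r.2.2.1 then (1 : Int) else 0)).sum) ∧
    (PySem.List.pyGetD (PySem.List.pyGetD (pvQuadTally wh hh g) 2 []) 1 0 =
      (g.map (fun r => if wh < r.1 ∧ r.2.2.1 < hh then (1 : Int) else 0)).sum) ∧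
    (PySem.List.pyGetD (PySem.List.pyGetD (pvQuadTally wh hh g) 2 []) 2 0 =
      (g.map (fun r => if wh < r.1 ∧ hh < r.2.2.1 then (1 : Int) else 0)).sum) := by
  rw [pvQuadTally_eq]
  exact ⟨rfl, rfl, rfl, rfl⟩

theorem pvMap_ne_nil {α β : Type} (l : List α) (f : α → β) (h : l ≠ []) : l.map f ≠ [] := by
  simp [h]

-- the advanced grid, advanced one more step
theorem pvGAt_succ (grid : List (Int × Int × Int × Int)) (w h_ t : Int) :
    (pvGAt grid w h_ t).map (fun b =>
      (PySem.Int.mod (b.1 + b.2.1) w, b.2.1, PySem.Int.mod (b.2.2.1 + b.2.2.2) h_, b.2.2.2))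
    = pvGAt grid w h_ (t + 1) := by
  simp only [pvGAt, List.map_map]
  refine List.map_congr_left (fun r _ => ?_)
  simp only [Function.comp_apply]
  refine Prod.ext ?_ (Prod.ext rfl (Prod.ext ?_ rfl))
  · show PySem.Int.mod (PySem.Int.mod (r.1 + t * r.2.2.1) w + r.2.2.1) w = _
    rw [pvMod_add]; congr 1; ring
  · show PySem.Int.mod (PySem.Int.mod (r.2.1 + t * r.2.2.2) h_ + r.2.2.2) h_ = _
    rw [pvMod_add]; congr 1; ring

-- A's reordered initial grid, advanced one step, is the closed form at t = 1
theorem pvGAt_one (grid : List (Int × Int × Int × Int)) (w h_ : Int) :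
    (grid.map (fun b => (b.1, b.2.2.1, b.2.1, b.2.2.2))).map (fun b =>
      (PySem.Int.mod (b.1 + b.2.1) w, b.2.1, PySem.Int.mod (b.2.2.1 + b.2.2.2) h_, b.2.2.2))
    = pvGAt grid w h_ 1 := by
  simp only [pvGAt, List.map_map]
  refine List.map_congr_left (fun r _ => ?_)
  simp only [Function.comp_apply]
  refine Prod.ext ?_ (Prod.ext rfl (Prod.ext ?_ rfl))
  · show PySem.Int.mod (r.1 + r.2.2.1) w = PySem.Int.mod (r.1 + 1 * r.2.2.1) w
    congr 1; ring
  · show PySem.Int.mod (r.2.1 + r.2.2.2) h_ = PySem.Int.mod (r.2.1 + 1 * r.2.2.2) h_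
    congr 1; ring

-- A's x-column count of the advanced grid = B's count of the closed-form positions
theorem pvMx_eq (grid : List (Int × Int × Int × Int)) (w h_ t : Int) (hg : grid ≠ []) :
    pvMostCount ((pvGAt grid w h_ t).map (·.1)) =
    pvTop (((grid.map (fun b => (b.1, b.2.2.1))).map (fun pv => PySem.Int.mod (pv.1 + t * pv.2) w))) := by
  simp only [pvGAt, List.map_map]
  exact pvMostCount_eq_pvTop (grid.map (fun r => PySem.Int.mod (r.1 + t * r.2.2.1) w))
    (pvMap_ne_nil _ _ hg)

theorem pvMy_eq (grid : List (Int × Int × Int × Int)) (w h_ t : Int) (hg : grid ≠ []) :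
    pvMostCount ((pvGAt grid w h_ t).map (·.2.2.1)) =
    pvTop (((grid.map (fun b => (b.2.1, b.2.2.2))).map (fun pv => PySem.Int.mod (pv.1 + t * pv.2) h_))) := by
  simp only [pvGAt, List.map_map]
  exact pvMostCount_eq_pvTop (grid.map (fun r => PySem.Int.mod (r.2.1 + t * r.2.2.2) h_))
    (pvMap_ne_nil _ _ hg)

theorem pvSeedX_eq (grid : List (Int × Int × Int × Int)) (hg : grid ≠ []) :
    pvMostCount ((grid.map (fun b => (b.1, b.2.2.1, b.2.1, b.2.2.2))).map (·.1)) =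
    pvTop ((grid.map (fun b => (b.1, b.2.2.1))).map (·.1)) := by
  simp only [List.map_map]
  exact pvMostCount_eq_pvTop (grid.map (fun r => r.1)) (pvMap_ne_nil _ _ hg)

theorem pvSeedY_eq (grid : List (Int × Int × Int × Int)) (hg : grid ≠ []) :
    pvMostCount ((grid.map (fun b => (b.1, b.2.2.1, b.2.1, b.2.2.2))).map (·.2.2.1)) =
    pvTop ((grid.map (fun b => (b.2.1, b.2.2.2))).map (·.1)) := by
  simp only [List.map_map]
  exact pvMostCount_eq_pvTop (grid.map (fun r => r.2.1)) (pvMap_ne_nil _ _ hg)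

-- one more scan step
theorem pvSFold_succ (grid : List (Int × Int × Int × Int)) (sel : (Int × Int × Int × Int) → Int × Int)
    (m b : Int) (hb : 1 ≤ b) :
    pvSFold grid sel m (b + 1) = pvBStep (grid.map sel) m (pvSFold grid sel m b) b := by
  simp only [pvSFold]
  rw [PySem.List.pyRange_one_succ_right hb, List.foldl_append]
  simp only [List.foldl_cons, List.foldl_nil]

-- A's part-1 expression at the time-100 grid is B's p1
theorem pvP1_eq (grid : List (Int × Int × Int × Int)) (w h_ : Int) :
    (PySem.List.pyGetD (PySem.List.pyGetD (pvQuadTally (PySem.Int.floordiv w 2) (PySem.Int.floordiv h_ 2) (pvGAt grid w h_ 100)) 1 []) 1 0 *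
     PySem.List.pyGetD (PySem.List.pyGetD (pvQuadTally (PySem.Int.floordiv w 2) (PySem.Int.floordiv h_ 2) (pvGAt grid w h_ 100)) 1 []) 2 0 *
     PySem.List.pyGetD (PySem.List.pyGetD (pvQuadTally (PySem.Int.floordiv w 2) (PySem.Int.floordiv h_ 2) (pvGAt grid w h_ 100)) 2 []) 1 0 *
     PySem.List.pyGetD (PySem.List.pyGetD (pvQuadTally (PySem.Int.floordiv w 2) (PySem.Int.floordiv h_ 2) (pvGAt grid w h_ 100)) 2 []) 2 0)
    = pvP1 grid w h_ := by
  obtain ⟨e1, e2, e3, e4⟩ := pvTally_read (PySem.Int.floordiv w 2) (PySem.Int.floordiv h_ 2) (pvGAt grid w h_ 100)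
  rw [e1, e2, e3, e4]
  simp only [pvP1, pvGAt, List.map_map]
  rfl

-- the main loop invariant
theorem pvLoop_inv (grid : List (Int × Int × Int × Int)) (w h_ : Int) (hg : grid ≠ []) (n : Nat) :
    (PySem.List.pyRange 1 (2 + (n : Int))).foldl (pvAStep w h_)
      ⟨grid.map (fun b => (b.1, b.2.2.1, b.2.1, b.2.2.2)), 0, 0,
        pvMostCount ((grid.map (fun b => (b.1, b.2.2.1, b.2.1, b.2.2.2))).map (·.1)),
        pvMostCount ((grid.map (fun b => (b.1, b.2.2.1, b.2.1, b.2.2.2))).map (·.2.2.1)), none⟩ =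
    ⟨pvGAt grid w h_ (1 + (n : Int)),
      (pvSFold grid (fun b => (b.1, b.2.2.1)) w (2 + (n : Int))).2,
      (pvSFold grid (fun b => (b.2.1, b.2.2.2)) h_ (2 + (n : Int))).2,
      (pvSFold grid (fun b => (b.1, b.2.2.1)) w (2 + (n : Int))).1,
      (pvSFold grid (fun b => (b.2.1, b.2.2.2)) h_ (2 + (n : Int))).1,
      if (100 : Int) ≤ 1 + (n : Int) then some (pvP1 grid w h_) else none⟩ := by
  induction n with
  | zero =>
    simp only [Nat.cast_zero, add_zero]
    rw [show (2:Int) = 1 + 1 by norm_num]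
    rw [PySem.List.pyRange_one_singleton]
    simp only [List.foldl_cons, List.foldl_nil]
    have hsf : ∀ (sel : (Int × Int × Int × Int) → Int × Int) (m : Int),
        pvSFold grid sel m (1 + 1) = pvBStep (grid.map sel) m (pvTop ((grid.map sel).map (·.1)), 0) 1 := by
      intro sel m
      simp only [pvSFold]
      rw [PySem.List.pyRange_one_singleton]
      simp only [List.foldl_cons, List.foldl_nil]
    rw [hsf, hsf]
    simp only [pvAStep, pvBStep]
    rw [pvGAt_one, pvMx_eq grid w h_ 1 hg, pvMy_eq grid w h_ 1 hg,
        pvSeedX_eq grid hg, pvSeedY_eq grid hg]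
    rw [if_neg (by norm_num : ¬((1:Int) = 100)), if_neg (by norm_num : ¬((100:Int) ≤ 1))]
  | succ n IH =>
    have hc2 : (2 + ((n + 1 : Nat) : Int)) = (2 + (n : Int)) + 1 := by push_cast; ring
    have hc1 : (1 + ((n + 1 : Nat) : Int)) = (1 + (n : Int)) + 1 := by push_cast; ring
    rw [hc2, hc1]
    rw [PySem.List.pyRange_one_succ_right (by omega : (1:Int) ≤ 2 + (n : Int)), List.foldl_append]
    rw [IH]
    simp only [List.foldl_cons, List.foldl_nil]
    rw [pvSFold_succ _ _ _ _ (by omega : (1:Int) ≤ 2 + (n : Int)),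
        pvSFold_succ _ _ _ _ (by omega : (1:Int) ≤ 2 + (n : Int))]
    simp only [pvAStep, pvBStep]
    rw [pvGAt_succ]
    rw [show ((1:Int) + (n : Int)) + 1 = 2 + (n : Int) by ring]
    rw [pvMx_eq grid w h_ (2 + (n : Int)) hg, pvMy_eq grid w h_ (2 + (n : Int)) hg]
    simp only [PVSt.mk.injEq]
    refine ⟨trivial, trivial, trivial, trivial, trivial, ?_⟩
    · by_cases h100 : (2 + (n : Int)) = 100
      · rw [if_pos h100, if_pos (by omega : (100:Int) ≤ 2 + (n : Int)), h100]
        exact congrArg some (pvP1_eq grid w h_)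
      · rw [if_neg h100]
        by_cases h99 : (100:Int) ≤ 1 + (n : Int)
        · rw [if_pos h99, if_pos (by omega : (100:Int) ≤ 2 + (n : Int))]
        · rw [if_neg h99, if_neg (by omega : ¬((100:Int) ≤ 2 + (n : Int)))]


-- ===== VERDICT (by name: the statement is the Claim_ definition above) =====
theorem full_solver_spec : Claim_equal_full_solver := by
  unfold Claim_equal_full_solver
  intro grid w h_ _ hpre
  obtain ⟨hg, hw, hh0, hgcd⟩ := hpre
  unfold Spec_full_solver
  simp only [full_solver, full_solver_alt]
  have h101 : (101 : Int) ≤ max (max w h_) 101 := le_max_right _ _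
  have hn : max (max w h_) 101 = 2 + (((max (max w h_) 101) - 2).toNat : Int) := by omega
  rw [hn, pvLoop_inv grid w h_ hg]
  dsimp only
  rw [if_pos (by omega : (100 : Int) ≤ 1 + (((max (max w h_) 101) - 2).toNat : Int))]
  rfl
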